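-- pv_equiv track=rewrite | github.com/pypi-data/pypi-mirror-48 | packages/twbotlib/twbotlib-0.0.52-py3-none-any.whl/twbotlib/base/main.py | argparse
-- ===== SOURCE A (Python) =====
-- def argparse(args_string: str) -> list:
--     in_string, space_cut = False, False
--     out, listout = '', []
--     for c in args_string:
--         if not in_string:
--             if c != '"':
--                 if c == ' ' and not space_cut:
--                     space_cut = True
--                     if out != '':
--                         listout.append(out)
--                         out = ''
--                 elif not space_cut:
--                     out += c
--                 elif space_cut and c != ' ':
--                     space_cut = False
--                     out += c
--         elif c != '"':
--             out += c
--         if c == '"':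
--             in_string = not in_string
--     if out:
--         listout.append(out)
--     return listout
-- ===== SOURCE B (Python) =====
-- def argparse(args_string: str) -> list:
--     # Token-structured scanner: skip separator spaces, then read one token as a
--     # maximal run of quoted segments / plain characters; a quoted token never
--     # merges with the argument after a following space (intended fix of A's
--     # leftover space_cut state).
--     res = []
--     i, n = 0, len(args_string)
--     while i < n:
--         if args_string[i] == ' ':
--             i += 1
--             continue
--         tok = ''
--         while i < n and args_string[i] != ' ':
--             if args_string[i] == '"':
--                 i += 1
--                 while i < n and args_string[i] != '"':
--                     tok += args_string[i]
--                     i += 1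
--                 i += 1
--             else:
--                 tok += args_string[i]
--                 i += 1
--         if tok:
--             res.append(tok)
--     return res
-- ===== Notes on version B (the rewrite author's own statement) =====
-- stated objective: alternative
-- what changed: Replaces the per-character four-variable state machine (in_string/space_cut flags threaded through one flat loop) by a token-structured scanner: an outer loop skips separator spaces and an inner loop reads one whole token (quoted segments handled by a dedicated inner run), so no space_cut state survives across tokens.
-- intended difference: On inputs where a quote is opened while A's space_cut flag is still set (i.e. a quoted token right after a separating space) and a later unprotected space is followed by further content, A glues the quoted token to the next argument (A('a "x" b') = ['a','xb']); B returns the separate arguments (['a','x','b']), the intended parse. — e.g. on argparse("a \"x\" b"): A returns ["a", "xb"], B returns ["a", "x", "b"]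
import Mathlib
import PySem

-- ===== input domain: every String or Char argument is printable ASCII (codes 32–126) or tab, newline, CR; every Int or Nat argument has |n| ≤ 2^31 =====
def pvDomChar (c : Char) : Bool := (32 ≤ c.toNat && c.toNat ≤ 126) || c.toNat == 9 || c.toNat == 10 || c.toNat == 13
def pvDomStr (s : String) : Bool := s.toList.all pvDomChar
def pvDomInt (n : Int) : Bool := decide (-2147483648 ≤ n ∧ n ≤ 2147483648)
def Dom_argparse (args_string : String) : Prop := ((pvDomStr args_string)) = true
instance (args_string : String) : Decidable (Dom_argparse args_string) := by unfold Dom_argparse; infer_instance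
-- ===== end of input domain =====

-- B replaces A's per-character state machine by a token-structured scanner (outer loop over
-- tokens, inner loops for quoted/plain runs); on D_ inputs it fixes A's space_cut leftover bug.

-- ===== PORT A =====
-- literal transliteration of A's loop: state (in_string, space_cut, out, listout), one char at a
-- time, same branch order; the trailing `if c == '"': in_string = not in_string` is applied in
-- each branch (each branch knows c), and the final `if out: listout.append(out)` is the [] case.
def argA (inq sc : Bool) (out : List Char) (lo : List String) : List Char → List String
  | [] => if out.isEmpty then lo else lo ++ [String.mk out]
  | c :: rest =>
    if inq = false then
      if c ≠ '"' then
        if c = ' ' ∧ sc = false then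
          (if out.isEmpty then argA false true [] lo rest
           else argA false true [] (lo ++ [String.mk out]) rest)
        else if sc = false then argA false false (out ++ [c]) lo rest
        else if c ≠ ' ' then argA false false (out ++ [c]) lo rest
        else argA false true out lo rest
      else argA true sc out lo rest
    else
      if c ≠ '"' then argA true sc (out ++ [c]) lo rest
      else argA false sc out lo rest

def argparse (args_string : String) : List String :=
  argA false false [] [] args_string.toList

-- ===== PORT B =====
-- inner-most loop of Source B: consume a quoted segment up to (and including) the closing quote
def readQ : List Char → List Char × List Char
  | [] => ([], [])
  | c :: t => if c = '"' then ([], t) else (c :: (readQ t).1, (readQ t).2)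

theorem readQ_len : ∀ t : List Char, (readQ t).2.length ≤ t.length := by
  intro t; induction t with
  | nil => simp [readQ]
  | cons c t ih =>
    by_cases h : c = '"'
    · simp [readQ, h]
    · simp [readQ, h]; omega

-- middle loop of Source B: read one token up to the next unprotected space
def readBody : List Char → List Char × List Char
  | [] => ([], [])
  | c :: t =>
    if c = ' ' then ([], c :: t)
    else if c = '"' then
      ((readQ t).1 ++ (readBody (readQ t).2).1, (readBody (readQ t).2).2)
    else
      (c :: (readBody t).1, (readBody t).2)
termination_by l => l.length
decreasing_by
  · have := readQ_len t; simp; omega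
  · simp

theorem readBody_len : ∀ l : List Char, (readBody l).2.length ≤ l.length := by
  intro l
  fun_induction readBody l
  · simp
  · simp
  · rename_i t h ih
    have h3 := readQ_len t
    simp at ih ⊢
    omega
  · rename_i c t h1 h2 ih
    simp at ih ⊢
    omega

def emitTok (tok : List Char) : List String := if tok.isEmpty then [] else [String.mk tok]

-- outer loop of Source B: skip separator spaces, read a token, emit it if nonempty
def bscan : List Char → List String
  | [] => []
  | c :: t =>
    if c = ' ' then bscan t
    else emitTok (readBody (c :: t)).1 ++ bscan (readBody (c :: t)).2
termination_by l => l.length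
decreasing_by
  · simp
  · have h1 := readQ_len t
    have h2 := readBody_len (readQ t).2
    have h3 := readBody_len t
    simp [readBody, *]
    by_cases hq : c = '"' <;> simp [hq] <;> omega

def argparse_alt (args_string : String) : List String := bscan args_string.toList

-- ===== PRECONDITION & SPEC =====
-- D_: closed-form positional description of the affected inputs (no output of either program is
-- computed).  pvTop k: position k is outside double quotes; pvSp k: an argument-separating space;
-- pvCt k: a character that contributes to some argument (not a quote, not a separating space).
def pvTop (l : List Char) (k : Nat) : Prop := 2 ∣ (l.take k).count '"'
def pvSp (l : List Char) (k : Nat) : Prop := l[k]! = ' ' ∧ pvTop l k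
def pvCt (l : List Char) (k : Nat) : Prop := l[k]! ≠ '"' ∧ ¬ pvSp l k

-- On inputs where a quote is opened while A's space_cut flag is still set (a quoted token right
-- after a separating space) and a later unprotected space is followed by further content, A glues
-- the quoted token to the next argument (A "a \"x\" b" = ["a","xb"]); B returns the separate
-- arguments ["a","x","b"], the intended parse.  (A separating space i, then argument content k
-- reached with no unquoted plain character since i, then a separating space p, then content q.)
def D_argparse (args_string : String) : Prop :=
  ∃ q < args_string.toList.length, ∃ p < q, ∃ k < p, ∃ i < k,
    pvSp args_string.toList i ∧ pvSp args_string.toList p ∧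
    pvCt args_string.toList k ∧ pvCt args_string.toList q ∧
    ∀ j < p, i < j → pvCt args_string.toList j → ¬ pvTop args_string.toList j

-- Proof-side automaton characterisation of pvD (used only by the proofs below).
-- hcF inq l: the rest l (entered with quote-parity inq) still contains argument content.
def hcF : Bool → List Char → Bool
  | _, [] => false
  | inq, '"' :: t => hcF (!inq) t
  | false, ' ' :: t => hcF false t
  | _, _ => true

-- diffAF inq sc one l: running A's control flags over l, a quote is opened while space_cut is
-- set, its token is pending at a later separating space, and content follows.
def diffAF : Bool → Bool → Bool → List Char → Bool
  | _, _, _, [] => false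
  | inq, sc, one, '"' :: t => diffAF (!inq) sc one t
  | true, sc, _, _ :: t => diffAF true sc true t
  | _, sc, one, ' ' :: t => if sc && one then hcF false t else diffAF false true false t
  | _, _, _, _ :: t => diffAF false false true t


-- proof-side packaging of D_argparse over a plain char list (old final-clause shape)
def pvD (l : List Char) : Prop :=
  ∃ q < l.length, ∃ p < q, ∃ k < p, ∃ i < k,
    pvSp l i ∧ pvSp l p ∧ pvCt l k ∧ pvCt l q ∧
    ∀ j < p, i < j → ¬ (pvCt l j ∧ pvTop l j)

theorem pvD_imp (s : String) (h : pvD s.toList) : D_argparse s := by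
  obtain ⟨q, hq, p, hp, k, hk, i, hi, h1, h2, h3, h4, h5⟩ := h
  exact ⟨q, hq, p, hp, k, hk, i, hi, h1, h2, h3, h4,
    fun j hj hij hc ht => h5 j hj hij ⟨hc, ht⟩⟩

-- diffAF inside a quoted segment: only the nonempty-token flag can change
theorem diffQ : ∀ (t : List Char) (sc one : Bool),
    diffAF true sc one t = diffAF false sc (one || !(readQ t).1.isEmpty) (readQ t).2 := by
  intro t
  induction t with
  | nil => intro sc one; simp [readQ, diffAF]
  | cons c t ih =>
    intro sc one
    by_cases hq : c = '"'
    · simp [diffAF, readQ, hq]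
    · simp [diffAF, readQ, hq, ih]

-- ===== positional toolkit =====
theorem get_pre (u v : List Char) (j : Nat) (h : j < u.length) : (u ++ v)[j]! = u[j]! := by
  rw [List.getElem!_eq_getElem?_getD, List.getElem!_eq_getElem?_getD, List.getElem?_append_left h]

theorem get_shift (u v : List Char) (k : Nat) : (u ++ v)[u.length + k]! = v[k]! := by
  rw [List.getElem!_eq_getElem?_getD, List.getElem!_eq_getElem?_getD,
    List.getElem?_append_right (by omega)]
  simp

theorem top_pre (u v : List Char) (j : Nat) (h : j ≤ u.length) : pvTop (u ++ v) j ↔ pvTop u j := by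
  unfold pvTop
  rw [List.take_append_of_le_length h]

theorem sp_pre (u v : List Char) (j : Nat) (h : j < u.length) : pvSp (u ++ v) j ↔ pvSp u j := by
  unfold pvSp
  rw [get_pre u v j h, top_pre u v j (le_of_lt h)]

theorem ct_pre (u v : List Char) (j : Nat) (h : j < u.length) : pvCt (u ++ v) j ↔ pvCt u j := by
  unfold pvCt
  rw [get_pre u v j h, sp_pre u v j h]

theorem top_shift (u v : List Char) (k : Nat) (hu : u.count '"' % 2 = 0) :
    pvTop (u ++ v) (u.length + k) ↔ pvTop v k := by
  unfold pvTop
  rw [List.take_length_add_append, List.count_append]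
  omega

theorem sp_shift (u v : List Char) (k : Nat) (hu : u.count '"' % 2 = 0) :
    pvSp (u ++ v) (u.length + k) ↔ pvSp v k := by
  unfold pvSp
  rw [get_shift u v k, top_shift u v k hu]

theorem ct_shift (u v : List Char) (k : Nat) (hu : u.count '"' % 2 = 0) :
    pvCt (u ++ v) (u.length + k) ↔ pvCt v k := by
  unfold pvCt
  rw [get_shift u v k, sp_shift u v k hu]

theorem readQ_decomp : ∀ t : List Char,
    (readQ t).1.count '"' = 0 ∧
      ((readQ t).2 = [] ∧ (readQ t).1 = t ∨ t = (readQ t).1 ++ '"' :: (readQ t).2) := by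
  intro t
  induction t with
  | nil => simp [readQ]
  | cons c t ih =>
    by_cases hq : c = '"'
    · simp [readQ, hq]
    · obtain ⟨h1, h2⟩ := ih
      refine ⟨by simp [readQ, hq, h1], ?_⟩
      rcases h2 with ⟨h2, h3⟩ | h2
      · exact Or.inl ⟨by simp [readQ, hq, h2], by simp [readQ, hq, h3]⟩
      · right
        simp [readQ, hq]
        exact h2

theorem hcF_pos : ∀ (t : List Char) (b : Bool), hcF b t = true →
    ∃ q < t.length, t[q]! ≠ '"' ∧ (t[q]! = ' ' → ((t.take q).count '"' % 2 = 0 ↔ b = true)) := by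
  intro t
  induction t with
  | nil => intro b h; simp [hcF] at h
  | cons c t ih =>
    intro b h
    by_cases hq : c = '"'
    · subst hq
      obtain ⟨q0, hq0, h1, h2⟩ := ih (!b) (by simpa [hcF] using h)
      refine ⟨q0 + 1, by simpa using hq0, by simpa using h1, ?_⟩
      intro hsp
      have := h2 (by simpa using hsp)
      simp only [List.take_succ_cons, List.count_cons_self]
      cases b <;> simp_all <;> omega
    · by_cases hb : b
      · subst hb
        refine ⟨0, by simp, by simpa using hq, ?_⟩
        intro _
        simp
      · have hb' : b = false := by simpa using hb
        subst hb'
        by_cases hs : c = ' '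
        · subst hs
          obtain ⟨q0, hq0, h1, h2⟩ := ih false (by simpa [hcF] using h)
          refine ⟨q0 + 1, by simpa using hq0, by simpa using h1, ?_⟩
          intro hsp
          have := h2 (by simpa using hsp)
          simpa [List.take_succ_cons, List.count_cons, hq] using this
        · refine ⟨0, by simp, by simpa using hq, ?_⟩
          intro hsp
          exact absurd hsp hs

-- content char from hcF at parity false
theorem hcF_ct (t : List Char) (h : hcF false t = true) : ∃ q < t.length, pvCt t q := by
  obtain ⟨q, hq, h1, h2⟩ := hcF_pos t false h
  refine ⟨q, hq, h1, ?_⟩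
  rintro ⟨h3, h4⟩
  have h5 : ¬ ((t.take q).count '"' % 2 = 0) := by simpa using h2 h3
  exact h5 (by simpa [pvTop, Nat.dvd_iff_mod_eq_zero] using h4)

def pvInv (u : List Char) (sc one : Bool) : Prop :=
  sc = true → ∃ i < u.length, pvSp u i ∧ (∀ j < u.length, i < j → ¬ (pvCt u j ∧ pvTop u j)) ∧
    (one = true → ∃ k < u.length, i < k ∧ pvCt u k)

theorem w_char (w : List Char) (hw0 : w.count '"' = 0) (a : Nat) (ha : a < w.length) :
    w[a]! ≠ '"' := by
  rw [List.getElem!_eq_getElem?_getD, List.getElem?_eq_getElem ha]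
  intro h
  have : '"' ∈ w := by rw [← h]; exact List.getElem_mem ha
  simpa [List.count_eq_zero.mp hw0] using this

theorem block_count (u w : List Char) (hw0 : w.count '"' = 0) (a : Nat) (h1 : 1 ≤ a)
    (h2 : a ≤ w.length + 1) :
    ((u ++ ('"' :: w ++ ['"'])).take (u.length + a)).count '"' = u.count '"' + 1 := by
  rw [List.take_length_add_append, List.count_append]
  have hx : ('"' :: w ++ ['"']).take a = '"' :: w.take (a - 1) := by
    match a, h1 with
    | a + 1, _ =>
      have hle : a ≤ w.length := by omega
      simp [List.take_append_of_le_length hle]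
  rw [hx]
  have : (w.take (a - 1)).count '"' = 0 :=
    Nat.le_zero.mp (hw0 ▸ (List.take_sublist _ _).count_le '"')
  simp [this]

theorem sp_at (u v : List Char) (hu : u.count '"' % 2 = 0) (hv : v[0]! = ' ') (hvl : 0 < v.length) :
    pvSp (u ++ v) u.length := by
  have := sp_shift u v 0 hu
  simp only [Nat.add_zero] at this
  refine this.mpr ⟨hv, ?_⟩
  simp [pvTop]

theorem bridge : ∀ (n : Nat) (l : List Char), l.length ≤ n → ∀ (u : List Char) (sc one : Bool),
    u.count '"' % 2 = 0 → pvInv u sc one → diffAF false sc one l = true → pvD (u ++ l) := by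
  intro n
  induction n with
  | zero =>
    intro l hl u sc one hu hinv hd
    have hnil : l = [] := List.eq_nil_of_length_eq_zero (Nat.le_zero.mp hl)
    subst hnil
    simp [diffAF] at hd
  | succ n ih =>
    intro l hl u sc one hu hinv hd
    match l with
    | [] => simp [diffAF] at hd
    | c :: t =>
      simp at hl
      by_cases hs : c = ' '
      · subst hs
        by_cases hso : sc = true ∧ one = true
        · obtain ⟨hsc, hone⟩ := hso
          subst hsc; subst hone
          have hh : hcF false t = true := by simpa [diffAF] using hd
          obtain ⟨i, hi, hspi, hall, honek⟩ := hinv rfl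
          obtain ⟨k, hk, hik, hctk⟩ := honek rfl
          obtain ⟨q0, hq0, hctq⟩ := hcF_ct t hh
          refine ⟨u.length + (1 + q0), by simp; omega, u.length, by omega, k, hk, i, hik,
            (sp_pre u (' ' :: t) i hi).mpr hspi,
            sp_at u (' ' :: t) hu (by simp) (by simp), (ct_pre u (' ' :: t) k hk).mpr hctk,
            ?_, ?_⟩
          · refine (ct_shift u (' ' :: t) (1 + q0) hu).mpr ?_
            have h2 := ct_shift [' '] t q0 (by decide)
            simp only [List.length_singleton] at h2
            rw [show (1 : Nat) + q0 = [' '].length + q0 by simp] at h2 ⊢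
            exact ((by simpa using h2 : pvCt ([' '] ++ t) (1 + q0) ↔ pvCt t q0)).mpr hctq
          · intro j hj hij hcj
            exact hall j hj hij
              ⟨(ct_pre u (' ' :: t) j hj).mp hcj.1, (top_pre u (' ' :: t) j (le_of_lt hj)).mp hcj.2⟩
        · have hd' : diffAF false true false t = true := by
            rcases Bool.eq_false_or_eq_true sc with h | h
            · subst h
              have ho : one = false := by
                rcases Bool.eq_false_or_eq_true one with h2 | h2
                · exact absurd ⟨rfl, h2⟩ hso
                · exact h2
              subst ho; simpa [diffAF] using hd
            · subst h; simpa [diffAF] using hd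
          rw [show u ++ ' ' :: t = (u ++ [' ']) ++ t by simp]
          refine ih t hl (u ++ [' ']) true false (by simp [List.count_append]; omega) ?_ hd'
          intro _
          rcases Bool.eq_false_or_eq_true sc with h | h
          · subst h
            obtain ⟨i, hi, hspi, hall, _⟩ := hinv rfl
            refine ⟨i, by simp; omega, (sp_pre u [' '] i hi).mpr hspi, ?_, by simp⟩
            intro j hj hij hcj
            simp at hj
            by_cases hjl : j < u.length
            · exact hall j hjl hij
                ⟨(ct_pre u [' '] j hjl).mp hcj.1, (top_pre u [' '] j (le_of_lt hjl)).mp hcj.2⟩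
            · have hj' : j = u.length := by omega
              subst hj'
              exact hcj.1.2 (sp_at u [' '] hu (by simp) (by simp))
          · refine ⟨u.length, by simp, sp_at u [' '] hu (by simp) (by simp), ?_, by simp⟩
            intro j hj hij
            simp at hj
            omega
      · by_cases hq : c = '"'
        · subst hq
          have hd1 : diffAF true sc one t = true := by simpa [diffAF] using hd
          rw [diffQ t sc one] at hd1
          obtain ⟨hw0, hdec⟩ := readQ_decomp t
          rcases hdec with ⟨h2, _⟩ | h2
          · rw [h2] at hd1; simp [diffAF] at hd1
          · have happ : u ++ '"' :: t = (u ++ ('"' :: (readQ t).1 ++ ['"'])) ++ (readQ t).2 := by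
              conv_lhs => rw [h2]
              simp
            rw [happ]
            have hlen : (readQ t).2.length ≤ n := by
              have h3 : t.length = (readQ t).1.length + 1 + (readQ t).2.length := by
                conv_lhs => rw [h2]
                simp
                omega
              omega
            have hu' : (u ++ ('"' :: (readQ t).1 ++ ['"'])).count '"' % 2 = 0 := by
              simp [List.count_append, hw0]
              omega
            refine ih (readQ t).2 hlen _ sc (one || !(readQ t).1.isEmpty) hu' ?_ hd1
            intro hsc
            subst hsc
            obtain ⟨i, hi, hspi, hall, honek⟩ := hinv rfl
            have hBlen : (u ++ ('"' :: (readQ t).1 ++ ['"'])).length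
                = u.length + ((readQ t).1.length + 2) := by simp
            refine ⟨i, by rw [hBlen]; omega, (sp_pre u _ i hi).mpr hspi, ?_, ?_⟩
            · intro j hj hij hcj
              rw [hBlen] at hj
              by_cases hjl : j < u.length
              · exact hall j hjl hij
                  ⟨(ct_pre u _ j hjl).mp hcj.1, (top_pre u _ j (le_of_lt hjl)).mp hcj.2⟩
              · rcases Nat.lt_or_ge j (u.length + 1) with h0 | h0
                · -- opening quote
                  have hj' : j = u.length + 0 := by omega
                  rw [hj'] at hcj
                  refine hcj.1.1 ?_
                  rw [get_shift]
                  simp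
                · rcases Nat.lt_or_ge j (u.length + (readQ t).1.length + 1) with h1 | h1
                  · -- inside the quoted run: odd parity
                    refine absurd hcj.2 ?_
                    unfold pvTop
                    rw [show j = u.length + (j - u.length) by omega,
                      block_count u _ hw0 (j - u.length) (by omega) (by omega)]
                    omega
                  · -- closing quote
                    have hj' : j = u.length + ((readQ t).1.length + 1) := by omega
                    rw [hj'] at hcj
                    refine hcj.1.1 ?_
                    rw [get_shift]
                    rw [show (readQ t).1.length + 1 = ('"' :: (readQ t).1).length + 0 by simp]
                    rw [get_shift]
                    simp
            · intro hone'
              rcases Bool.eq_false_or_eq_true one with ho | ho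
              · subst ho
                obtain ⟨k, hk, hik, hctk⟩ := honek rfl
                exact ⟨k, by rw [hBlen]; omega, hik, (ct_pre u _ k hk).mpr hctk⟩
              · subst ho
                simp at hone'
                -- (readQ t).1 ≠ []
                refine ⟨u.length + 1, by rw [hBlen]; omega, by omega, ?_, ?_⟩
                · have hw : (readQ t).1 ≠ [] := hone'
                  have hgl : (0 : Nat) < (readQ t).1.length := List.length_pos_iff.mpr hw
                  intro h3
                  rw [show u.length + 1 = u.length + (0 + 1) by omega, get_shift] at h3
                  rw [get_pre ('"' :: (readQ t).1) ['"'] (0 + 1) (by simp; omega)] at h3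
                  rw [List.getElem!_cons_succ] at h3
                  exact w_char _ hw0 0 hgl h3
                · rintro ⟨_, h4⟩
                  unfold pvTop at h4
                  rw [block_count u _ hw0 1 (by omega) (by omega)] at h4
                  omega
        · have hd' : diffAF false false true t = true := by simpa [diffAF, hq, hs] using hd
          rw [show u ++ c :: t = (u ++ [c]) ++ t by simp]
          refine ih t hl (u ++ [c]) false true (by simp [List.count_append, hq]; omega)
            (by intro h; simp at h) hd'

-- ===== converse: the automaton detects every pvD witness (for the fast Decidable instance) =====
theorem pvD_rev (s : String) (h : D_argparse s) : pvD s.toList := by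
  obtain ⟨q, hq, p, hp, k, hk, i, hi, h1, h2, h3, h4, h5⟩ := h
  exact ⟨q, hq, p, hp, k, hk, i, hi, h1, h2, h3, h4,
    fun j hj hij hcj => h5 j hj hij hcj.1 hcj.2⟩

theorem hcF_neg : ∀ (t : List Char) (b : Bool), hcF b t = false →
    ∀ x < t.length, t[x]! = '"' ∨ (t[x]! = ' ' ∧ ((t.take x).count '"' % 2 = 0 ↔ b = false)) := by
  intro t
  induction t with
  | nil => intro b _ x hx; simp at hx
  | cons c t ih =>
    intro b h x hx
    by_cases hq : c = '"'
    · subst hq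
      match x with
      | 0 => exact Or.inl (by simp)
      | x + 1 =>
        rcases ih (!b) (by simpa [hcF] using h) x (by simpa using hx) with h1 | ⟨h1, h2⟩
        · exact Or.inl (by simpa using h1)
        · refine Or.inr ⟨by simpa using h1, ?_⟩
          simp only [List.take_succ_cons, List.count_cons_self]
          cases b <;> simp_all <;> omega
    · have hb : b = false := by
        cases b
        · rfl
        · exfalso; simp [hcF, hq] at h
      subst hb
      by_cases hs : c = ' '
      · subst hs
        match x with
        | 0 => exact Or.inr ⟨by simp, by simp⟩
        | x + 1 =>
          rcases ih false (by simpa [hcF] using h) x (by simpa using hx) with h1 | ⟨h1, h2⟩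
          · exact Or.inl (by simpa using h1)
          · refine Or.inr ⟨by simpa using h1, ?_⟩
            simpa [List.take_succ_cons, List.count_cons, hq] using h2
      · exfalso; simp [hcF, hq, hs] at h

theorem hcF_of_ct (t : List Char) (q : Nat) (hq : q < t.length) (hc : pvCt t q) :
    hcF false t = true := by
  cases hb : hcF false t
  · rcases hcF_neg t false hb q hq with h1 | ⟨h1, h2⟩
    · exact absurd h1 hc.1
    · exact absurd (by
        unfold pvSp pvTop
        exact ⟨h1, Nat.dvd_of_mod_eq_zero (h2.mpr rfl)⟩) hc.2
  · rfl

theorem block_count2 (u w : List Char) (hw0 : w.count '"' = 0) (a : Nat) (h1 : 1 ≤ a) :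
    ((u ++ '"' :: w).take (u.length + a)).count '"' = u.count '"' + 1 := by
  rw [List.take_length_add_append, List.count_append]
  match a, h1 with
  | a + 1, _ =>
    have h2 : (w.take a).count '"' = 0 :=
      Nat.le_zero.mp (hw0 ▸ (List.take_sublist _ _).count_le '"')
    simp [List.take_succ_cons, h2]

-- partial-witness predicates over the already-scanned prefix u (converse invariants):
-- pvP1: a separating space with no unquoted plain character after it (A's space_cut is set);
-- pvP2: additionally some content since that space (A's out is nonempty);
-- pvP3: additionally a later separating space (the bug has fired; any content completes pvD).
def pvP1 (u : List Char) : Prop :=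
  ∃ i < u.length, pvSp u i ∧ ∀ j < u.length, i < j → ¬ (pvCt u j ∧ pvTop u j)
def pvP2 (u : List Char) : Prop :=
  ∃ i < u.length, (pvSp u i ∧ ∀ j < u.length, i < j → ¬ (pvCt u j ∧ pvTop u j)) ∧
    ∃ k < u.length, i < k ∧ pvCt u k
def pvP3 (u : List Char) : Prop :=
  ∃ p < u.length, ∃ k < p, ∃ i < k, pvSp u i ∧ pvSp u p ∧ pvCt u k ∧
    ∀ j < p, i < j → ¬ (pvCt u j ∧ pvTop u j)

theorem conv : ∀ (n : Nat) (l : List Char), l.length ≤ n → ∀ (u : List Char) (sc one : Bool),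
    u.count '"' % 2 = 0 → (pvP1 u → sc = true) → (pvP2 u → sc = true ∧ one = true) →
    ¬ pvP3 u → pvD (u ++ l) → diffAF false sc one l = true := by
  intro n
  induction n with
  | zero =>
    intro l hl u sc one hu h1 h2 h3 hD
    have hnil : l = [] := List.eq_nil_of_length_eq_zero (Nat.le_zero.mp hl)
    subst hnil
    exfalso
    obtain ⟨q, hq, p, hp, k, hk, i, hi, s1, s2, s3, _, s5⟩ := hD
    simp at hq
    exact h3 ⟨p, by omega, k, hk, i, hi, by simpa using s1, by simpa using s2,
      by simpa using s3, fun j hj hij hcj => s5 j hj hij (by simpa using hcj)⟩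
  | succ n ih =>
    intro l hl u sc one hu h1 h2 h3 hD
    match l with
    | [] =>
      exfalso
      obtain ⟨q, hq, p, hp, k, hk, i, hi, s1, s2, s3, _, s5⟩ := hD
      simp at hq
      exact h3 ⟨p, by omega, k, hk, i, hi, by simpa using s1, by simpa using s2,
        by simpa using s3, fun j hj hij hcj => s5 j hj hij (by simpa using hcj)⟩
    | c :: t =>
      simp at hl
      by_cases hs : c = ' '
      · subst hs
        by_cases hso : sc = true ∧ one = true
        · obtain ⟨h4, h5⟩ := hso
          subst h4; subst h5
          rw [show diffAF false true true (' ' :: t) = hcF false t from by simp [diffAF]]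
          obtain ⟨q, hq, p, hp, k, hk, i, hi, s1, s2, s3, s4, s5⟩ := hD
          rcases Nat.lt_trichotomy q u.length with hql | hql | hql
          · exact absurd ⟨p, by omega, k, hk, i, hi, (sp_pre u _ i (by omega)).mp s1,
              (sp_pre u _ p (by omega)).mp s2, (ct_pre u _ k (by omega)).mp s3,
              fun j hj hij hcj => s5 j hj hij ⟨(ct_pre u _ j (by omega)).mpr hcj.1,
                (top_pre u _ j (by omega)).mpr hcj.2⟩⟩ h3
          · exfalso
            have hsp : pvSp (u ++ ' ' :: t) u.length := sp_at u (' ' :: t) hu (by simp) (by simp)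
            rw [← hql] at hsp
            exact s4.2 hsp
          · have hq0 : q = u.length + (1 + (q - u.length - 1)) := by omega
            have hle : q - u.length - 1 < t.length := by
              simp at hq; omega
            refine hcF_of_ct t (q - u.length - 1) hle ?_
            have hA : pvCt (' ' :: t) (1 + (q - u.length - 1)) :=
              (ct_shift u (' ' :: t) (1 + (q - u.length - 1)) hu).mp (by rw [← hq0]; exact s4)
            have hB := ct_shift [' '] t (q - u.length - 1) (by decide)
            simp only [List.length_singleton] at hB
            exact ((by simpa using hB :
              pvCt ([' '] ++ t) (1 + (q - u.length - 1)) ↔ pvCt t (q - u.length - 1))).mp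
              (by simpa using hA)
        · have hred : diffAF false sc one (' ' :: t) = diffAF false true false t := by
            rcases Bool.eq_false_or_eq_true sc with h | h
            · subst h
              have ho : one = false := by
                rcases Bool.eq_false_or_eq_true one with h2' | h2'
                · exact absurd ⟨rfl, h2'⟩ hso
                · exact h2'
              subst ho; simp [diffAF]
            · subst h; simp [diffAF]
          rw [hred]
          have hDrw : pvD ((u ++ [' ']) ++ t) := by simpa using hD
          refine ih t hl (u ++ [' ']) true false (by simp [List.count_append]; omega)
            (fun _ => rfl) ?_ ?_ hDrw
          · intro hP2
            exfalso
            obtain ⟨i, hi, ⟨hspi, hall⟩, k, hk, hik, hctk⟩ := hP2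
            have hkl : k < u.length := by
              rcases Nat.lt_or_ge k u.length with h | h
              · exact h
              · exfalso
                have hku : k = u.length := by simp at hk; omega
                subst hku
                exact hctk.2 (sp_at u [' '] hu (by simp) (by simp))
            have hil : i < u.length := by omega
            exact hso (h2 ⟨i, hil, ⟨(sp_pre u [' '] i hil).mp hspi,
              fun j hj hij hcj => hall j (by simp; omega) hij
                ⟨(ct_pre u [' '] j hj).mpr hcj.1, (top_pre u [' '] j (by omega)).mpr hcj.2⟩⟩,
              k, hkl, hik, (ct_pre u [' '] k hkl).mp hctk⟩)
          · intro hP3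
            obtain ⟨p, hp, k, hk, i, hi, t1, t2, t3, t5⟩ := hP3
            rcases Nat.lt_or_ge p u.length with hpl | hpl
            · exact h3 ⟨p, hpl, k, hk, i, hi, (sp_pre u [' '] i (by omega)).mp t1,
                (sp_pre u [' '] p hpl).mp t2, (ct_pre u [' '] k (by omega)).mp t3,
                fun j hj hij hcj => t5 j hj hij ⟨(ct_pre u [' '] j (by omega)).mpr hcj.1,
                  (top_pre u [' '] j (by omega)).mpr hcj.2⟩⟩
            · have hpu : p = u.length := by simp at hp; omega
              subst hpu
              exact hso (h2 ⟨i, by omega, ⟨(sp_pre u [' '] i (by omega)).mp t1,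
                fun j hj hij hcj => t5 j hj hij ⟨(ct_pre u [' '] j hj).mpr hcj.1,
                  (top_pre u [' '] j (by omega)).mpr hcj.2⟩⟩,
                k, hk, hi, (ct_pre u [' '] k (by omega)).mp t3⟩)
      · by_cases hq : c = '"'
        · subst hq
          rw [show diffAF false sc one ('"' :: t) = diffAF true sc one t from by simp [diffAF],
            diffQ t sc one]
          obtain ⟨hw0, hdec⟩ := readQ_decomp t
          rcases hdec with ⟨h2r, h3r⟩ | h2r
          · exfalso
            obtain ⟨q, hqb, p, hp, k, hk, i, hi, s1, s2, s3, _, s5⟩ := hD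
            have htc : t.count '"' = 0 := by rw [← h3r]; exact hw0
            rcases Nat.lt_trichotomy p u.length with hpl | hpl | hpl
            · exact h3 ⟨p, hpl, k, hk, i, hi, (sp_pre u _ i (by omega)).mp s1,
                (sp_pre u _ p hpl).mp s2, (ct_pre u _ k (by omega)).mp s3,
                fun j hj hij hcj => s5 j hj hij ⟨(ct_pre u _ j (by omega)).mpr hcj.1,
                  (top_pre u _ j (by omega)).mpr hcj.2⟩⟩
            · have hg : (u ++ '"' :: t)[u.length]! = '"' := by
                have := get_shift u ('"' :: t) 0
                simpa using this
              have hx := s2.1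
              rw [← hpl] at hg
              rw [hg] at hx
              exact absurd hx (by decide)
            · refine absurd s2.2 ?_
              unfold pvTop
              rw [show p = u.length + (p - u.length) by omega,
                block_count2 u t htc (p - u.length) (by omega)]
              omega
          · have happ : u ++ '"' :: t = (u ++ ('"' :: (readQ t).1 ++ ['"'])) ++ (readQ t).2 := by
              conv_lhs => rw [h2r]
              simp
            have hlen : (readQ t).2.length ≤ n := by
              have h3' : t.length = (readQ t).1.length + 1 + (readQ t).2.length := by
                conv_lhs => rw [h2r]
                simp
                omega
              omega
            have hu' : (u ++ ('"' :: (readQ t).1 ++ ['"'])).count '"' % 2 = 0 := by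
              simp [List.count_append, hw0]
              omega
            have hBlen : (u ++ ('"' :: (readQ t).1 ++ ['"'])).length
                = u.length + ((readQ t).1.length + 2) := by simp
            have hg0 : (u ++ ('"' :: (readQ t).1 ++ ['"']))[u.length]! = '"' := by
              have := get_shift u ('"' :: (readQ t).1 ++ ['"']) 0
              simpa using this
            have hg1 : (u ++ ('"' :: (readQ t).1 ++ ['"']))[u.length + ((readQ t).1.length + 1)]! = '"' := by
              rw [get_shift]
              rw [show (readQ t).1.length + 1 = ('"' :: (readQ t).1).length + 0 by simp]
              rw [get_shift]
              simp
            have hodd : ∀ a, 1 ≤ a → a ≤ (readQ t).1.length + 1 →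
                ¬ pvTop (u ++ ('"' :: (readQ t).1 ++ ['"'])) (u.length + a) := by
              intro a ha1 ha2
              unfold pvTop
              rw [block_count u (readQ t).1 hw0 a ha1 ha2]
              omega
            have key : ∀ x, x < u.length + ((readQ t).1.length + 2) →
                pvSp (u ++ ('"' :: (readQ t).1 ++ ['"'])) x → x < u.length := by
              intro x hx hspx
              by_contra hge
              have hge' : u.length ≤ x := Nat.le_of_not_lt hge
              rcases Nat.eq_or_lt_of_le hge' with he | hlt
              · rw [he] at hg0
                have := hspx.1
                rw [hg0] at this
                exact absurd this (by decide)
              · refine hodd (x - u.length) (by omega) (by omega) ?_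
                rw [show u.length + (x - u.length) = x by omega]
                exact hspx.2
            rw [happ] at hD
            refine ih (readQ t).2 hlen _ sc (one || !(readQ t).1.isEmpty) hu' ?_ ?_ ?_ hD
            · intro hP1
              obtain ⟨i, hi, hspi, hall⟩ := hP1
              rw [hBlen] at hi hall
              have hil : i < u.length := key i hi hspi
              exact h1 ⟨i, hil, (sp_pre u _ i hil).mp hspi,
                fun j hj hij hcj => hall j (by omega) hij ⟨(ct_pre u _ j hj).mpr hcj.1,
                  (top_pre u _ j (by omega)).mpr hcj.2⟩⟩
            · intro hP2
              obtain ⟨i, hi, ⟨hspi, hall⟩, k, hk, hik, hctk⟩ := hP2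
              rw [hBlen] at hi hall hk
              have hil : i < u.length := key i hi hspi
              have hP1u : pvP1 u := ⟨i, hil, (sp_pre u _ i hil).mp hspi,
                fun j hj hij hcj => hall j (by omega) hij ⟨(ct_pre u _ j hj).mpr hcj.1,
                  (top_pre u _ j (by omega)).mpr hcj.2⟩⟩
              rcases Nat.lt_or_ge k u.length with hkl | hkg
              · have := h2 ⟨i, hil, ⟨(sp_pre u _ i hil).mp hspi,
                  fun j hj hij hcj => hall j (by omega) hij ⟨(ct_pre u _ j hj).mpr hcj.1,
                    (top_pre u _ j (by omega)).mpr hcj.2⟩⟩,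
                  k, hkl, hik, (ct_pre u _ k hkl).mp hctk⟩
                exact ⟨this.1, by rw [this.2]; rfl⟩
              · refine ⟨h1 hP1u, ?_⟩
                rcases Nat.eq_or_lt_of_le hkg with he | hlt
                · rw [he] at hg0
                  exact absurd hg0 hctk.1
                · rcases Nat.lt_or_ge k (u.length + ((readQ t).1.length + 1)) with hk2 | hk2
                  · have hnn : (readQ t).1 ≠ [] := by
                      intro hnil
                      rw [hnil] at hk2
                      simp at hk2
                      omega
                    simp [hnn]
                  · have hke : k = u.length + ((readQ t).1.length + 1) := by omega
                    rw [← hke] at hg1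
                    exact absurd hg1 hctk.1
            · intro hP3
              obtain ⟨p, hp, k, hk, i, hi, t1, t2, t3, t5⟩ := hP3
              rw [hBlen] at hp
              have hpl : p < u.length := key p hp t2
              exact h3 ⟨p, hpl, k, hk, i, hi, (sp_pre u _ i (by omega)).mp t1,
                (sp_pre u _ p hpl).mp t2, (ct_pre u _ k (by omega)).mp t3,
                fun j hj hij hcj => t5 j hj hij ⟨(ct_pre u _ j (by omega)).mpr hcj.1,
                  (top_pre u _ j (by omega)).mpr hcj.2⟩⟩
        · rw [show diffAF false sc one (c :: t) = diffAF false false true t from by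
            simp [diffAF, hq, hs]]
          have hDrw : pvD ((u ++ [c]) ++ t) := by simpa using hD
          have hct : pvCt (u ++ [c]) u.length := by
            refine ⟨?_, ?_⟩
            · have := get_shift u [c] 0
              simp only [Nat.add_zero] at this
              rw [this]
              simpa using hq
            · intro hsp'
              have := hsp'.1
              rw [(by simpa using get_shift u [c] 0 : (u ++ [c])[u.length]! = c)] at this
              exact hs this
          have htp : pvTop (u ++ [c]) u.length := by
            unfold pvTop
            rw [List.take_append_of_le_length le_rfl]
            exact Nat.dvd_of_mod_eq_zero (by simpa using hu)
          refine ih t hl (u ++ [c]) false true (by simp [List.count_append, hq]; omega)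
            ?_ ?_ ?_ hDrw
          · intro hP1
            exfalso
            obtain ⟨i, hi, hspi, hall⟩ := hP1
            have hil : i < u.length := by
              rcases Nat.lt_or_ge i u.length with h | h
              · exact h
              · exfalso
                have hiu : i = u.length := by simp at hi; omega
                subst hiu
                have := hspi.1
                rw [(by simpa using get_shift u [c] 0 : (u ++ [c])[u.length]! = c)] at this
                exact hs this
            exact hall u.length (by simp) hil ⟨hct, htp⟩
          · intro hP2
            exfalso
            obtain ⟨i, hi, ⟨hspi, hall⟩, _⟩ := hP2
            have hil : i < u.length := by
              rcases Nat.lt_or_ge i u.length with h | h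
              · exact h
              · exfalso
                have hiu : i = u.length := by simp at hi; omega
                subst hiu
                have := hspi.1
                rw [(by simpa using get_shift u [c] 0 : (u ++ [c])[u.length]! = c)] at this
                exact hs this
            exact hall u.length (by simp) hil ⟨hct, htp⟩
          · intro hP3
            obtain ⟨p, hp, k, hk, i, hi, t1, t2, t3, t5⟩ := hP3
            have hpl : p < u.length := by
              rcases Nat.lt_or_ge p u.length with h | h
              · exact h
              · exfalso
                have hpu : p = u.length := by simp at hp; omega
                subst hpu
                have := t2.1
                rw [(by simpa using get_shift u [c] 0 : (u ++ [c])[u.length]! = c)] at this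
                exact hs this
            exact h3 ⟨p, hpl, k, hk, i, hi, (sp_pre u [c] i (by omega)).mp t1,
              (sp_pre u [c] p hpl).mp t2, (ct_pre u [c] k (by omega)).mp t3,
              fun j hj hij hcj => t5 j hj hij ⟨(ct_pre u [c] j (by omega)).mpr hcj.1,
                (top_pre u [c] j (by omega)).mpr hcj.2⟩⟩

theorem D_auto (s : String) : D_argparse s ↔ diffAF false false false s.toList = true := by
  constructor
  · intro h
    exact conv s.toList.length s.toList le_rfl [] false false (by simp)
      (fun h1 => by obtain ⟨i, hi, _⟩ := h1; simp at hi)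
      (fun h1 => by obtain ⟨i, hi, _⟩ := h1; simp at hi)
      (fun h1 => by obtain ⟨p, hp, _⟩ := h1; simp at hp)
      (by simpa using pvD_rev s h)
  · intro h
    exact pvD_imp s (by
      simpa using bridge s.toList.length s.toList le_rfl [] false false (by simp)
        (fun h' => by simp at h') h)

instance (args_string : String) : Decidable (D_argparse args_string) :=
  decidable_of_iff (diffAF false false false args_string.toList = true) (D_auto args_string).symm


def Spec_argparse (args_string : String) (out : List String) : Prop := ¬ D_argparse args_string → out = argparse_alt args_string
instance (args_string : String) (out : List String) : Decidable (Spec_argparse args_string out) := by unfold Spec_argparse; infer_instance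

def pvDiffWitness_argparse : String := "a \"x\" b"
def pvDiffWitnessOut_argparse : (List String) × (List String) := (["a", "xb"], ["a", "x", "b"])

-- ===== CLAIM (what is proved, stated in full; the proofs are below) =====
def Claim_unchanged_argparse : Prop := ∀ (args_string : String), Dom_argparse args_string → Spec_argparse args_string (argparse args_string)
def Claim_changed_argparse : Prop := Dom_argparse (pvDiffWitness_argparse) ∧ D_argparse (pvDiffWitness_argparse) ∧ argparse (pvDiffWitness_argparse) = pvDiffWitnessOut_argparse.1 ∧ argparse_alt (pvDiffWitness_argparse) = pvDiffWitnessOut_argparse.2 ∧ pvDiffWitnessOut_argparse.1 ≠ pvDiffWitnessOut_argparse.2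
def Claim_exact_argparse : Prop := ∀ (args_string : String), Dom_argparse args_string → D_argparse args_string → argparse args_string ≠ argparse_alt args_string

-- ===== LEMMAS AND PROOFS =====

theorem argA_nil (inq sc : Bool) (out : List Char) (lo : List String) :
    argA inq sc out lo [] = lo ++ emitTok out := by
  cases h : out.isEmpty <;> simp [argA, emitTok, h]

-- A inside a quoted segment: the segment's characters are appended to out, nothing else changes
theorem argA_string : ∀ (t : List Char) (sc : Bool) (out : List Char) (lo : List String),
    argA true sc out lo t = argA false sc (out ++ (readQ t).1) lo (readQ t).2 := by
  intro t
  induction t with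
  | nil => intro sc out lo; simp [readQ, argA_nil]
  | cons c t ih =>
    intro sc out lo
    by_cases hq : c = '"'
    · simp [argA, readQ, hq]
    · simp [argA, readQ, hq, ih]

-- A on a content-free rest (only quotes and separating spaces): it just flushes out
theorem argA_nocontent : ∀ (l : List Char) (inq : Bool) (out : List Char) (lo : List String),
    hcF inq l = false → argA inq true out lo l = lo ++ emitTok out := by
  intro l
  induction l with
  | nil => intro inq out lo _; simp [argA_nil]
  | cons c t ih =>
    intro inq out lo h
    by_cases hq : c = '"'
    · cases inq <;> simp [argA, hq] <;>
        exact ih _ _ _ (by simpa [hcF, hq] using h)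
    · cases inq
      · by_cases hs : c = ' '
        · simp [argA, hs]
          exact ih _ _ _ (by simpa [hcF, hq, hs] using h)
        · simp [hcF, hq, hs] at h
      · simp [hcF, hq] at h

theorem readBody_nocontent : ∀ (l : List Char), hcF false l = false →
    (readBody l).1 = [] ∧ hcF false (readBody l).2 = false := by
  intro l
  fun_induction readBody l with
  | case1 => intro h; simpa using h
  | case2 t => intro h; simpa [hcF] using h
  | case3 t h ih =>
    intro hc
    have hct : hcF true t = false := by simpa [hcF] using hc
    have hq : (readQ t).1 = [] ∧ hcF false (readQ t).2 = false := by
      cases t with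
      | nil => simp [readQ, hcF]
      | cons d t' =>
        by_cases hd : d = '"'
        · subst hd
          exact ⟨by simp [readQ], by simpa [hcF] using hct⟩
        · simp [hcF, hd] at hct
    obtain ⟨hq1, hq2⟩ := hq
    have h3 := ih hq2
    simp [hq1, h3.1, h3.2]
  | case4 c t h1 h2 ih =>
    intro hc
    simp [hcF, h1, h2] at hc

theorem bscan_nocontent : ∀ (l : List Char), hcF false l = false → bscan l = [] := by
  intro l
  fun_induction bscan l with
  | case1 => intro _; rfl
  | case2 t ih =>
    intro hc
    exact ih (by simpa [hcF] using hc)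
  | case3 c t h ih =>
    intro hc
    obtain ⟨h1, h2⟩ := readBody_nocontent _ hc
    simp [h1, emitTok]
    exact ih h2

theorem bscan_eq : ∀ (l : List Char), bscan l = emitTok (readBody l).1 ++ bscan (readBody l).2 := by
  intro l
  cases l with
  | nil => simp [bscan, readBody, emitTok]
  | cons c t =>
    by_cases hs : c = ' '
    · simp [bscan, readBody, hs, emitTok]
    · simp [bscan, hs]

theorem isEmpty_app {α : Type} (a b : List α) : (a ++ b).isEmpty = (a.isEmpty && b.isEmpty) := by
  cases a <;> simp

-- Master invariant: from a top-level state (sc, out), A produces exactly B's tokenisation of the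
-- rest, provided no space_cut-quirk difference lies ahead (diffAF = false).
theorem master : ∀ (n : Nat) (l : List Char), l.length ≤ n →
    ∀ (sc : Bool) (out : List Char) (lo : List String),
    diffAF false sc (!out.isEmpty) l = false →
    argA false sc out lo l = lo ++ emitTok (out ++ (readBody l).1) ++ bscan (readBody l).2 := by
  intro n
  induction n with
  | zero =>
    intro l hl sc out lo _
    have hnil : l = [] := List.eq_nil_of_length_eq_zero (Nat.le_zero.mp hl)
    subst hnil
    simp [argA_nil, readBody, bscan]
  | succ n ih =>
    intro l hl sc out lo hd
    match l with
    | [] => simp [argA_nil, readBody, bscan]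
    | c :: t =>
      simp at hl
      by_cases hs : c = ' '
      · subst hs
        have hrb : readBody (' ' :: t) = ([], ' ' :: t) := by simp [readBody]
        have hbs : bscan (' ' :: t) = bscan t := by simp [bscan]
        rw [hrb]
        cases sc with
        | false =>
          have hd' : diffAF false true false t = false := by simpa [diffAF] using hd
          have lhs : argA false false out lo (' ' :: t) =
              argA false true [] (lo ++ emitTok out) t := by
            cases h2 : out.isEmpty <;> simp [argA, emitTok, h2]
          rw [lhs, ih t hl true [] (lo ++ emitTok out) (by simpa using hd'), hbs, bscan_eq t]
          simp [emitTok]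
        | true =>
          cases h2 : out.isEmpty with
          | true =>
            have hnil : out = [] := by simpa using h2
            subst hnil
            have hd' : diffAF false true false t = false := by simpa [diffAF] using hd
            have lhs : argA false true [] lo (' ' :: t) = argA false true [] lo t := by
              simp [argA]
            rw [lhs, ih t hl true [] lo (by simpa using hd'), hbs, bscan_eq t]
            simp [emitTok]
          | false =>
            have h1 : hcF false t = false := by simpa [diffAF, h2] using hd
            have lhs : argA false true out lo (' ' :: t) = argA false true out lo t := by
              simp [argA]
            rw [lhs, argA_nocontent t false out lo h1, hbs, bscan_nocontent t h1]
            simp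
      · by_cases hq : c = '"'
        · subst hq
          have lhs : argA false sc out lo ('"' :: t) = argA true sc out lo t := by
            simp [argA]
          rw [lhs, argA_string t sc out lo]
          have hlen : (readQ t).2.length ≤ n := le_trans (readQ_len t) hl
          have hd' : diffAF false sc (!(out ++ (readQ t).1).isEmpty) (readQ t).2 = false := by
            have h0 : diffAF true sc (!out.isEmpty) t = false := by simpa [diffAF] using hd
            have h1 := (diffQ t sc (!out.isEmpty)).symm.trans h0
            simpa [isEmpty_app, Bool.not_and] using h1
          rw [ih (readQ t).2 hlen sc (out ++ (readQ t).1) lo hd']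
          have hrb : readBody ('"' :: t) =
              ((readQ t).1 ++ (readBody (readQ t).2).1, (readBody (readQ t).2).2) := by
            simp [readBody]
          rw [hrb]
          simp
        · have lhs : argA false sc out lo (c :: t) = argA false false (out ++ [c]) lo t := by
            cases sc <;> simp [argA, hq, hs]
          rw [lhs, ih t hl false (out ++ [c]) lo (by simpa [diffAF, hq, hs, isEmpty_app] using hd)]
          have hrb : readBody (c :: t) = (c :: (readBody t).1, (readBody t).2) := by
            simp [readBody, hq, hs]
          rw [hrb]
          simp

-- ===== tightness: everywhere inside D_ the two ports disagree =====

-- argA appends its result after the accumulated list lo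
theorem argA_pre : ∀ (l : List Char) (inq sc : Bool) (out : List Char) (lo : List String),
    argA inq sc out lo l = lo ++ argA inq sc out [] l := by
  intro l
  induction l with
  | nil => intro inq sc out lo; rw [argA_nil, argA_nil]; simp
  | cons c t ih =>
    intro inq sc out lo
    by_cases hq : c = '"'
    · subst hq
      cases inq with
      | true =>
        have step : ∀ lo', argA true sc out lo' ('"' :: t) = argA false sc out lo' t :=
          fun lo' => by simp [argA]
        rw [step, step, ih]
      | false =>
        have step : ∀ lo', argA false sc out lo' ('"' :: t) = argA true sc out lo' t :=
          fun lo' => by simp [argA]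
        rw [step, step, ih]
    · cases inq with
      | true =>
        have step : ∀ lo', argA true sc out lo' (c :: t) = argA true sc (out ++ [c]) lo' t :=
          fun lo' => by simp [argA, hq]
        rw [step, step, ih]
      | false =>
        by_cases hs : c = ' '
        · subst hs
          cases sc with
          | true =>
            have step : ∀ lo', argA false true out lo' (' ' :: t) = argA false true out lo' t :=
              fun lo' => by simp [argA]
            rw [step, step, ih]
          | false =>
            cases hoe : out.isEmpty with
            | true =>
              have step : ∀ lo', argA false false out lo' (' ' :: t)
                  = argA false true [] lo' t :=
                fun lo' => by simp [argA, hoe]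
              rw [step, step, ih]
            | false =>
              have step : ∀ lo', argA false false out lo' (' ' :: t)
                  = argA false true [] (lo' ++ [String.mk out]) t :=
                fun lo' => by simp [argA, hoe]
              rw [step, step, ih, ih (lo := [] ++ [String.mk out])]
              simp
        · have step : ∀ lo', argA false sc out lo' (c :: t)
              = argA false false (out ++ [c]) lo' t :=
            fun lo' => by cases sc <;> simp [argA, hq, hs]
          rw [step, step, ih]

-- hcF through a quoted segment
theorem hcFQ (t : List Char) :
    hcF true t = ((!(readQ t).1.isEmpty) || hcF false (readQ t).2) := by
  cases t with
  | nil => simp [hcF, readQ]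
  | cons c t' =>
    by_cases hq : c = '"'
    · simp [hcF, readQ, hq]
    · simp [hcF, readQ, hq]

-- with space_cut off and a nonempty pending token, A's next emitted token extends it
theorem ext_tok : ∀ (n : Nat) (t : List Char), t.length ≤ n → ∀ (out : List Char)
    (lo : List String), out ≠ [] → ∃ w ws,
    argA false false out lo t = lo ++ String.mk (out ++ w) :: ws := by
  intro n
  induction n with
  | zero =>
    intro t ht out lo ho
    have hnil : t = [] := List.eq_nil_of_length_eq_zero (Nat.le_zero.mp ht)
    subst hnil
    refine ⟨[], [], ?_⟩
    rw [argA_nil]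
    simp [emitTok, ho]
  | succ n ih =>
    intro t ht out lo ho
    match t with
    | [] =>
      refine ⟨[], [], ?_⟩
      rw [argA_nil]
      simp [emitTok, ho]
    | c :: t' =>
      simp at ht
      by_cases hs : c = ' '
      · subst hs
        refine ⟨[], argA false true [] [] t', ?_⟩
        have hoe : out.isEmpty = false := by simpa [List.isEmpty_iff] using ho
        have hstep : argA false false out lo (' ' :: t') =
            argA false true [] (lo ++ [String.mk out]) t' := by
          simp [argA, hoe]
        rw [hstep, argA_pre]
        simp
      · by_cases hq : c = '"'
        · subst hq
          have hstep : argA false false out lo ('"' :: t') = argA true false out lo t' := by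
            simp [argA]
          rw [hstep, argA_string]
          have hlen : (readQ t').2.length ≤ n := le_trans (readQ_len t') ht
          obtain ⟨w, ws, hw⟩ := ih (readQ t').2 hlen (out ++ (readQ t').1) lo (by simp [ho])
          exact ⟨(readQ t').1 ++ w, ws, by rw [hw]; simp⟩
        · have hstep : argA false false out lo (c :: t') =
              argA false false (out ++ [c]) lo t' := by
            simp [argA, hq, hs]
          rw [hstep]
          obtain ⟨w, ws, hw⟩ := ih t' ht (out ++ [c]) lo (by simp)
          exact ⟨[c] ++ w, ws, by rw [hw]; simp⟩

-- with space_cut on and content ahead, A's next emitted token STRICTLY extends out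
theorem next_tok : ∀ (n : Nat) (t : List Char), t.length ≤ n → hcF false t = true →
    ∀ (out : List Char) (lo : List String), ∃ w ws, w ≠ [] ∧
    argA false true out lo t = lo ++ String.mk (out ++ w) :: ws := by
  intro n
  induction n with
  | zero =>
    intro t ht hc
    have hnil : t = [] := List.eq_nil_of_length_eq_zero (Nat.le_zero.mp ht)
    subst hnil
    simp [hcF] at hc
  | succ n ih =>
    intro t ht hc out lo
    match t with
    | [] => simp [hcF] at hc
    | c :: t' =>
      simp at ht
      by_cases hs : c = ' '
      · subst hs
        have hstep : argA false true out lo (' ' :: t') = argA false true out lo t' := by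
          simp [argA]
        rw [hstep]
        exact ih t' ht (by simpa [hcF] using hc) out lo
      · by_cases hq : c = '"'
        · subst hq
          have hstep : argA false true out lo ('"' :: t') = argA true true out lo t' := by
            simp [argA]
          rw [hstep, argA_string]
          have hc' : ((!(readQ t').1.isEmpty) || hcF false (readQ t').2) = true := by
            rw [← hcFQ]
            simpa [hcF] using hc
          have hlen : (readQ t').2.length ≤ n := le_trans (readQ_len t') ht
          cases hrest : hcF false (readQ t').2 with
          | true =>
            obtain ⟨w, ws, hw, he⟩ := ih (readQ t').2 hlen hrest (out ++ (readQ t').1) lo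
            exact ⟨(readQ t').1 ++ w, ws, by simp [hw], by rw [he]; simp⟩
          | false =>
            have hseg : (readQ t').1 ≠ [] := by
              rw [hrest] at hc'
              simpa [List.isEmpty_iff] using hc'
            refine ⟨(readQ t').1, [], hseg, ?_⟩
            rw [argA_nocontent (readQ t').2 false _ lo hrest]
            simp [emitTok, hseg]
        · have hstep : argA false true out lo (c :: t') =
              argA false false (out ++ [c]) lo t' := by
            simp [argA, hq, hs]
          rw [hstep]
          obtain ⟨w, ws, hw⟩ := ext_tok n t' ht (out ++ [c]) lo (by simp)
          exact ⟨[c] ++ w, ws, by simp, by rw [hw]; simp⟩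

-- the two sides disagree as soon as the automaton reports a difference ahead
theorem masterD : ∀ (n : Nat) (l : List Char), l.length ≤ n →
    ∀ (sc : Bool) (out : List Char) (lo : List String),
    diffAF false sc (!out.isEmpty) l = true →
    argA false sc out lo l ≠ lo ++ emitTok (out ++ (readBody l).1) ++ bscan (readBody l).2 := by
  intro n
  induction n with
  | zero =>
    intro l hl sc out lo hd
    have hnil : l = [] := List.eq_nil_of_length_eq_zero (Nat.le_zero.mp hl)
    subst hnil
    simp [diffAF] at hd
  | succ n ih =>
    intro l hl sc out lo hd
    match l with
    | [] => simp [diffAF] at hd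
    | c :: t =>
      simp at hl
      by_cases hs : c = ' '
      · subst hs
        have hrb : readBody (' ' :: t) = ([], ' ' :: t) := by simp [readBody]
        have hbs : bscan (' ' :: t) = bscan t := by simp [bscan]
        rw [hrb]
        cases sc with
        | false =>
          have hd' : diffAF false true false t = true := by simpa [diffAF] using hd
          have lhs : argA false false out lo (' ' :: t) =
              argA false true [] (lo ++ emitTok out) t := by
            cases h2 : out.isEmpty <;> simp [argA, emitTok, h2]
          rw [lhs]
          intro he
          refine ih t hl true [] (lo ++ emitTok out) (by simpa using hd') ?_
          rw [he, hbs, bscan_eq t]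
          simp [emitTok]
        | true =>
          cases h2 : out.isEmpty with
          | true =>
            have hnil : out = [] := by simpa using h2
            subst hnil
            have hd' : diffAF false true false t = true := by simpa [diffAF] using hd
            have lhs : argA false true [] lo (' ' :: t) = argA false true [] lo t := by
              simp [argA]
            rw [lhs]
            intro he
            refine ih t hl true [] lo (by simpa using hd') ?_
            rw [he, hbs, bscan_eq t]
            simp [emitTok]
          | false =>
            -- the firing point: A keeps its pending token, B flushes it here
            have h1 : hcF false t = true := by simpa [diffAF, h2] using hd
            have ho : out ≠ [] := by simpa [List.isEmpty_iff] using h2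
            have lhs : argA false true out lo (' ' :: t) = argA false true out lo t := by
              simp [argA]
            rw [lhs, hbs]
            obtain ⟨w, ws, hw, he⟩ := next_tok t.length t le_rfl h1 out lo
            rw [he, show emitTok (out ++ []) = [String.mk out] from by simp [emitTok, h2],
              List.append_assoc]
            intro hcontra
            have h3 := List.append_cancel_left hcontra
            simp only [List.cons_append, List.nil_append, List.cons.injEq] at h3
            have h4 : out ++ w = out := by
              have h6 := congrArg String.toList h3.1
              simpa [show ∀ x : List Char, (String.mk x).toList = x from
                fun x => String.toList_ofList] using h6
            have h5 : w = [] := by simpa using h4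
            exact hw h5
      · by_cases hq : c = '"'
        · subst hq
          have lhs : argA false sc out lo ('"' :: t) = argA true sc out lo t := by
            simp [argA]
          rw [lhs, argA_string]
          have hlen : (readQ t).2.length ≤ n := le_trans (readQ_len t) hl
          have hd' : diffAF false sc (!(out ++ (readQ t).1).isEmpty) (readQ t).2 = true := by
            have h0 : diffAF true sc (!out.isEmpty) t = true := by simpa [diffAF] using hd
            have h1 := (diffQ t sc (!out.isEmpty)).symm.trans h0
            simpa [isEmpty_app, Bool.not_and] using h1
          have hrb : readBody ('"' :: t) =
              ((readQ t).1 ++ (readBody (readQ t).2).1, (readBody (readQ t).2).2) := by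
            simp [readBody]
          rw [hrb]
          intro he
          refine ih (readQ t).2 hlen sc (out ++ (readQ t).1) lo hd' ?_
          rw [he]
          simp
        · have lhs : argA false sc out lo (c :: t) = argA false false (out ++ [c]) lo t := by
            cases sc <;> simp [argA, hq, hs]
          have hd' : diffAF false false (!(out ++ [c]).isEmpty) t = true := by
            simpa [diffAF, hq, hs, isEmpty_app] using hd
          have hrb : readBody (c :: t) = (c :: (readBody t).1, (readBody t).2) := by
            simp [readBody, hq, hs]
          rw [lhs, hrb]
          intro he
          refine ih t hl false (out ++ [c]) lo hd' ?_
          rw [he]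
          simp

-- ===== VERDICT (by name: the statement is the Claim_ definition above) =====
theorem argparse_spec : Claim_unchanged_argparse := by
  intro s _ hnD
  have hd : diffAF false false false s.toList = false := by
    cases hb : diffAF false false false s.toList
    · rfl
    · have hinv0 : pvInv [] false false := by intro h; simp at h
      have hDp : pvD ([] ++ s.toList) :=
        bridge s.toList.length s.toList le_rfl [] false false (by simp) hinv0 hb
      exact absurd (pvD_imp s hDp) hnD
  show argA false false [] [] s.toList = bscan s.toList
  rw [master s.toList.length s.toList le_rfl false [] [] (by simpa using hd)]
  rw [bscan_eq s.toList]
  simp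

theorem wit_alt : argparse_alt pvDiffWitness_argparse = ["a", "x", "b"] := by
  simp [argparse_alt, pvDiffWitness_argparse, bscan, readBody, readQ, emitTok]
  decide

theorem argparse_changed : Claim_changed_argparse := by
  unfold Claim_changed_argparse
  refine ⟨by decide, by decide, by decide, ?_, by decide⟩
  simpa [pvDiffWitnessOut_argparse] using wit_alt

theorem argparse_tight : Claim_exact_argparse := by
  intro s _ hD
  have hdiff : diffAF false false false s.toList = true := (D_auto s).mp hD
  show argA false false [] [] s.toList ≠ bscan s.toList
  intro h
  refine masterD s.toList.length s.toList le_rfl false [] [] (by simpa using hdiff) ?_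
  rw [h, bscan_eq s.toList]
  simp
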